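-- pv_equiv track=rewrite | github.com/Mapanare-Research/Mapanare | mapanare/cli.py | _format_mapanare
-- ===== SOURCE A (Python) =====
-- def _format_mapanare(source: str) -> str:
--     """Basic Mapanare source formatter.
--
--     Normalizes:
--     - Trailing whitespace on each line
--     - Consistent indentation (4 spaces)
--     - No more than 2 consecutive blank lines
--     - Single trailing newline at end of file
--     - Spaces around binary operators
--     """
--     lines = source.split("\n")
--     result: list[str] = []
--     consecutive_blank = 0
--
--     for line in lines:
--         # Strip trailing whitespace
--         stripped = line.rstrip()
--
--         if stripped == "":
--             consecutive_blank += 1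
--             if consecutive_blank <= 2:
--                 result.append("")
--             continue
--
--         consecutive_blank = 0
--
--         # Normalize leading whitespace: convert tabs to 4 spaces
--         content = stripped.lstrip()
--         leading = stripped[: len(stripped) - len(content)]
--         # Replace tabs with 4 spaces
--         leading = leading.replace("\t", "    ")
--         result.append(leading + content)
--
--     # Strip trailing blank lines, ensure single trailing newline
--     while result and result[-1] == "":
--         result.pop()
--     result.append("")
--
--     return "\n".join(result)
-- ===== SOURCE B (Python) =====
-- def _format_mapanare(source: str) -> str:
--     def norm(line):
--         s = line.rstrip()
--         if s == "":
--             return ""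
--         body = s.lstrip()
--         return s[: len(s) - len(body)].replace("\t", "    ") + body
--
--     ns = [norm(line) for line in source.split("\n")]
--     # keep a blank line only if one of the two lines right before it is non-blank
--     kept = [s for s, p1, p2 in zip(ns, ["x"] + ns, ["x", "x"] + ns)
--             if s != "" or p1 != "" or p2 != ""]
--     # cut just after the last non-blank line, keep a single trailing newline
--     cut = 0
--     for i, s in enumerate(kept):
--         if s != "":
--             cut = i + 1
--     return "\n".join(kept[:cut] + [""])
-- ===== Notes on version B (the rewrite author's own statement) =====
-- stated objective: alternative
-- what changed: Replaces A's single stateful loop (consecutive-blank counter, conditional appends, then a destructive pop-from-the-end loop) by a pipeline: a pure per-line normalize pass, a shift-zip filter that keeps a blank line only when one of the two preceding lines is non-blank, and a forward scan for the cut point after the last non-blank line.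
import Mathlib
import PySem

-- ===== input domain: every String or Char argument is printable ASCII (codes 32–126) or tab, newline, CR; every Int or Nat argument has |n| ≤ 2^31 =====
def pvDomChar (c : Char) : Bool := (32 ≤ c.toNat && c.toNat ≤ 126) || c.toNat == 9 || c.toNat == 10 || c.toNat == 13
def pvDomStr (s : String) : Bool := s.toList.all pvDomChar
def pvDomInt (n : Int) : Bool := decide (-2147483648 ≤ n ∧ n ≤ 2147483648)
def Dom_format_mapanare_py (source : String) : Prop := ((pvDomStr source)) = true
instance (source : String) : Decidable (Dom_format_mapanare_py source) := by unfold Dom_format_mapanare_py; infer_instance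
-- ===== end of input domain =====

-- B replaces A's stateful blank-counting loop by a shift-zip filter (keep a blank line only
-- when one of the two preceding normalized lines is non-blank) plus a forward scan for the cut
-- point after the last non-blank line: a different decomposition of the same formatter.


-- ===== PORT A =====
-- loop body of A's single for-loop over the lines (state: result so far, consecutive_blank)
def pvStepA (st : List String × Nat) (line : String) : List String × Nat :=
  let stripped := PySem.Str.rstrip line
  if stripped = "" then
    let cb := st.2 + 1
    (if cb ≤ 2 then st.1 ++ [""] else st.1, cb)
  else
    let content := PySem.Str.lstrip stripped
    let leading := PySem.Str.slice stripped none (some (PySem.Str.len stripped - PySem.Str.len content))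
    let leading := PySem.Str.replace leading "\t" "    "
    (st.1 ++ [leading ++ content], 0)

-- A's `while result and result[-1] == "": result.pop()` as the obvious structural recursion
def pvPopTrailing : List String → List String
  | [] => []
  | x :: t =>
    match pvPopTrailing t with
    | [] => if x = "" then [] else [x]
    | r => x :: r

def format_mapanare_py (source : String) : String :=
  -- sep is the non-empty literal "\n", so split? is always `some`
  let lines := (PySem.Str.split? source "\n").getD []
  let res := (lines.foldl pvStepA ([], 0)).1
  PySem.Str.join "\n" (pvPopTrailing res ++ [""])

-- ===== PORT B =====
-- Source B's `norm`: rstrip; for non-blank lines expand tabs in the leading-whitespace prefix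
def pvNorm (line : String) : String :=
  let s := PySem.Str.rstrip line
  if s = "" then "" else
    let body := PySem.Str.lstrip s
    PySem.Str.replace (PySem.Str.slice s none (some (PySem.Str.len s - PySem.Str.len body))) "\t" "    " ++ body

def format_mapanare_py_alt (source : String) : String :=
  let ns := ((PySem.Str.split? source "\n").getD []).map pvNorm
  let kept := (ns.zip (("x" :: ns).zip ("x" :: "x" :: ns))).filterMap
      (fun q => if q.1 ≠ "" ∨ q.2.1 ≠ "" ∨ q.2.2 ≠ "" then some q.1 else none)
  let cut := (PySem.List.enumerate kept).foldl
      (fun acc p => if p.2 ≠ "" then p.1 + 1 else acc) 0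
  PySem.Str.join "\n" (PySem.List.slice kept none (some cut) ++ [""])

-- ===== PRECONDITION & SPEC =====
def Spec_format_mapanare_py (source : String) (out : String) : Prop := out = format_mapanare_py_alt source
instance (source : String) (out : String) : Decidable (Spec_format_mapanare_py source out) := by unfold Spec_format_mapanare_py; infer_instance

-- ===== CLAIM (what is proved, stated in full; the proofs are below) =====
def Claim_equal_format_mapanare_py : Prop := ∀ (source : String), Dom_format_mapanare_py source → Spec_format_mapanare_py source (format_mapanare_py source)


-- ===== LEMMAS AND PROOFS =====

-- reference "keep" list: A's counter-driven selection of normalized lines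
def pvKeep : Nat → List String → List String
  | _, [] => []
  | cb, s :: t =>
    if s = "" then (if cb + 1 ≤ 2 then [""] else []) ++ pvKeep (cb + 1) t
    else s :: pvKeep 0 t

-- 1 + index of the last non-blank entry (0 if none)
def pvM : List String → Nat
  | [] => 0
  | x :: t => if pvM t = 0 then (if x = "" then 0 else 1) else pvM t + 1

theorem pvNorm_blank (l : String) (h : PySem.Str.rstrip l = "") : pvNorm l = "" := by
  simp [pvNorm, h]

theorem pvNorm_ne (l : String) (h : PySem.Str.rstrip l ≠ "") : pvNorm l ≠ "" := by
  intro hc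
  simp only [pvNorm, if_neg h] at hc
  have h2 := congrArg String.toList hc
  rw [String.toList_append, show ("" : String).toList = [] from rfl] at h2
  have h1 : (PySem.Str.lstrip (PySem.Str.rstrip l)).toList = [] := (List.append_eq_nil_iff.mp h2).2
  rw [PySem.Str.toList_lstrip, PySem.Str.toList_rstrip] at h1
  have hne : PySem.Chars.rstrip l.toList ≠ [] := by
    intro h'
    apply h
    have := congrArg String.mk h'
    rw [← PySem.Str.toList_rstrip] at this
    simpa using this
  set d := List.dropWhile PySem.Chars.isspace l.toList.reverse with hd
  have hdne : d ≠ [] := by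
    intro h'
    apply hne
    simp [PySem.Chars.rstrip, ← hd, h']
  have hhead : PySem.Chars.isspace (d.head hdne) = false := List.head_dropWhile_not _ _
  have hall : ∀ c ∈ PySem.Chars.rstrip l.toList, PySem.Chars.isspace c := by
    simpa [PySem.Chars.lstrip, List.dropWhile_eq_nil_iff] using h1
  have hmem : d.head hdne ∈ PySem.Chars.rstrip l.toList := by
    simp [PySem.Chars.rstrip, ← hd, List.head_mem]
  have hcontra : (true : Bool) = false := (hall _ hmem).symm.trans hhead
  simp at hcontra

theorem foldA_eq (ls : List String) : ∀ (res : List String) (cb : Nat),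
    (ls.foldl pvStepA (res, cb)).1 = res ++ pvKeep cb (ls.map pvNorm) := by
  induction ls with
  | nil => intro res cb; simp [pvKeep]
  | cons l t ih =>
    intro res cb
    by_cases h : PySem.Str.rstrip l = ""
    · have hstep : pvStepA (res, cb) l = ((if cb + 1 ≤ 2 then res ++ [""] else res), cb + 1) := by
        simp [pvStepA, h]
      rw [List.foldl_cons, hstep, List.map_cons, pvNorm_blank l h]
      by_cases h2 : cb + 1 ≤ 2 <;> simp [h2, ih, pvKeep]
    · have hstep : pvStepA (res, cb) l = (res ++ [pvNorm l], 0) := by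
        simp [pvStepA, pvNorm, h]
      rw [List.foldl_cons, hstep, List.map_cons]
      simp [ih, pvKeep, pvNorm_ne l h]

theorem zipKept_eq (ns : List String) : ∀ (cb : Nat) (p1 p2 : String),
    (cb = 0 → p1 ≠ "") → (cb = 1 → p1 = "" ∧ p2 ≠ "") → (2 ≤ cb → p1 = "" ∧ p2 = "") →
    (ns.zip ((p1 :: ns).zip (p2 :: p1 :: ns))).filterMap
      (fun q => if q.1 ≠ "" ∨ q.2.1 ≠ "" ∨ q.2.2 ≠ "" then some q.1 else none)
      = pvKeep cb ns := by
  induction ns with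
  | nil => intro cb p1 p2 _ _ _; simp [pvKeep]
  | cons s t ih =>
    intro cb p1 p2 h0 h1 h2
    by_cases hs : s = ""
    · subst hs
      have ihx := ih (cb + 1) "" p1 (by omega)
        (by intro hq
            have hq0 : cb = 0 := by omega
            exact ⟨rfl, h0 hq0⟩)
        (by intro hq
            rcases Nat.lt_or_ge cb 2 with hlt | hge
            · have : cb = 1 := by omega
              exact ⟨rfl, (h1 this).1⟩
            · exact ⟨rfl, (h2 hge).1⟩)
      simp only [List.zip_cons_cons] at ihx ⊢
      by_cases h2' : cb + 1 ≤ 2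
      · have hor : p1 ≠ "" ∨ p2 ≠ "" := by
          rcases Nat.eq_zero_or_pos cb with h' | h'
          · exact Or.inl (h0 h')
          · have : cb = 1 := by omega
            exact Or.inr (h1 this).2
        have hf : (fun q : String × String × String =>
            if q.1 ≠ "" ∨ q.2.1 ≠ "" ∨ q.2.2 ≠ "" then some q.1 else none) ("", p1, p2)
            = some "" := by
          rcases hor with h' | h' <;> simp [h']
        simp only [List.filterMap_cons, hf, ihx]
        simp [pvKeep, h2']
      · have hge : 2 ≤ cb := by omega
        have hf : (fun q : String × String × String =>
            if q.1 ≠ "" ∨ q.2.1 ≠ "" ∨ q.2.2 ≠ "" then some q.1 else none) ("", p1, p2)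
            = none := by
          simp [(h2 hge).1, (h2 hge).2]
        simp only [List.filterMap_cons, hf, ihx]
        simp [pvKeep, h2']
    · have ihx := ih 0 s p1 (fun _ => hs) (by omega) (by omega)
      simp only [List.zip_cons_cons] at ihx ⊢
      have hf : (fun q : String × String × String =>
          if q.1 ≠ "" ∨ q.2.1 ≠ "" ∨ q.2.2 ≠ "" then some q.1 else none) (s, p1, p2)
          = some s := by
        simp [hs]
      simp only [List.filterMap_cons, hf, ihx]
      simp [pvKeep, hs]

theorem pop_eq_take (xs : List String) : pvPopTrailing xs = xs.take (pvM xs) := by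
  induction xs with
  | nil => simp [pvPopTrailing, pvM]
  | cons x t ih =>
    by_cases h : pvM t = 0
    · have hnil : pvPopTrailing t = [] := by rw [ih, h]; simp
      simp only [pvPopTrailing, hnil, pvM, h]
      by_cases hx : x = "" <;> simp [hx]
    · have hne : pvPopTrailing t ≠ [] := by
        rw [ih]
        intro hc
        rcases List.take_eq_nil_iff.mp hc with h' | h'
        · exact h h'
        · subst h'; simp [pvM] at h
      simp only [pvPopTrailing, ih, pvM, h]
      cases hE : t.take (pvM t) with
      | nil => exact absurd (by rw [ih, hE]) hne
      | cons y r => simp [← hE]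

theorem cut_eq (xs : List String) : ∀ (k acc : Int),
    (PySem.List.enumerate xs k).foldl (fun acc p => if p.2 ≠ "" then p.1 + 1 else acc) acc
      = if pvM xs = 0 then acc else k + pvM xs := by
  induction xs with
  | nil => intro k acc; simp [PySem.List.enumerate, pvM]
  | cons x t ih =>
    intro k acc
    have hcons : PySem.List.enumerate (x :: t) k = (k, x) :: PySem.List.enumerate t (k + 1) := by
      simp [PySem.List.enumerate]
    rw [hcons, List.foldl_cons]
    show (PySem.List.enumerate t (k + 1)).foldl _ (if x ≠ "" then k + 1 else acc) = _
    by_cases hx : x = ""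
    · rw [if_neg (by simpa using hx), ih (k + 1) acc]
      by_cases h : pvM t = 0
      · simp [pvM, h, hx]
      · simp only [pvM, h]
        push_cast
        omega
    · rw [if_pos hx, ih (k + 1) (k + 1)]
      by_cases h : pvM t = 0
      · simp [pvM, h, hx]
      · simp only [pvM, h]
        push_cast
        omega

-- ===== VERDICT (by name: the statement is the Claim_ definition above) =====
theorem format_mapanare_py_spec : Claim_equal_format_mapanare_py := by
  intro source _
  show format_mapanare_py source = format_mapanare_py_alt source
  have hA : format_mapanare_py source =
      PySem.Str.join "\n"
        (pvPopTrailing ((((PySem.Str.split? source "\n").getD []).foldl pvStepA ([], 0)).1) ++ [""]) := rfl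
  set ns := ((PySem.Str.split? source "\n").getD []).map pvNorm with hns
  set kept := (ns.zip (("x" :: ns).zip ("x" :: "x" :: ns))).filterMap
      (fun q => if q.1 ≠ "" ∨ q.2.1 ≠ "" ∨ q.2.2 ≠ "" then some q.1 else none) with hkept
  have hB : format_mapanare_py_alt source =
      PySem.Str.join "\n" (PySem.List.slice kept none
        (some ((PySem.List.enumerate kept).foldl
          (fun acc p => if p.2 ≠ "" then p.1 + 1 else acc) 0)) ++ [""]) := rfl
  rw [hA, hB, foldA_eq, List.nil_append, ← hns]
  rw [hkept, zipKept_eq ns 0 "x" "x" (fun _ => by simp) (by omega) (by omega)]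
  rw [cut_eq]
  set K := pvKeep 0 ns
  have hcut : (if pvM K = 0 then (0 : Int) else 0 + (pvM K : Int)) = (pvM K : Int) := by
    split_ifs with h <;> simp [h]
  rw [hcut, PySem.List.slice_to K (by positivity), pop_eq_take]
  simp
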